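-- pv_equiv track=rewrite | github.com/Yiseull/baekjoon-python3 | 실버/1652_누울 자리를 찾아라.py | count_vertical_space
-- ===== SOURCE A (Python) =====
-- def count_vertical_space(room, n) -> int:  # 세로로 누울 수 있는 자리
--     cnt = 0
--     for j in range(n):
--         tmp = 0
--         for i in range(n):
--             if room[i][j] == '.':
--                 tmp += 1
--             else:
--                 if tmp > 1:
--                     cnt += 1
--                 tmp = 0
--         if tmp > 1:
--             cnt += 1
--     return cnt
-- ===== SOURCE B (Python) =====
-- def count_vertical_space(room, n) -> int:  # count run-STARTS of length-
--     # >=2 vertical dot runs, statelessly, instead of A's running-counter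
--     # state machine: a gap of length > 1 in column j is uniquely
--     # identified by its first cell i, i.e. room[i][j] and room[i+1][j]
--     # are '.' and the cell above (if any) is not '.'.
--     return sum(
--         1
--         for j in range(n)
--         for i in range(n - 1)
--         if room[i][j] == '.' and room[i + 1][j] == '.'
--         and (i == 0 or room[i - 1][j] != '.')
--     )
-- ===== Notes on version B (the rewrite author's own statement) =====
-- stated objective: simpler
-- what changed: A's per-column running-counter state machine (tmp/cnt with an end-of-column flush) is replaced by a single stateless comprehension that counts the start cells of vertical dot-runs of length >= 2 (cell and cell below are '.', cell above absent or not '.').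
import Mathlib
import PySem

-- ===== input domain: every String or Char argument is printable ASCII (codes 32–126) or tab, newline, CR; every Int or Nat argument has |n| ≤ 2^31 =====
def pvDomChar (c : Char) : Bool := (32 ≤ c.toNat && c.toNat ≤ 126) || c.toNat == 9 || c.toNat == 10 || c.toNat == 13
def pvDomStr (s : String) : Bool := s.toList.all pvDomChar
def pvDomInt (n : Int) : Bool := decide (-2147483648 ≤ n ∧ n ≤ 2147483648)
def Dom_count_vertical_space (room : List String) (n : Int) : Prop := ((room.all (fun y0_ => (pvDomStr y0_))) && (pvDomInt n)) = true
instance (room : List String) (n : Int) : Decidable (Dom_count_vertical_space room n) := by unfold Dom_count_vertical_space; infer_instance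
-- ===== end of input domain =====

-- B replaces A's per-column running-counter state machine by a stateless
-- count of the start cells of vertical dot-runs of length ≥ 2 (simpler).

-- ===== PORT A =====
-- room[i][j]; exact under Pre_ (both indices in range), default otherwise
def pvCell (room : List String) (i j : Int) : Char :=
  PySem.List.pyGetD (PySem.List.pyGetD room i "").toList j '#'

def count_vertical_space (room : List String) (n : Int) : Int :=
  (PySem.List.pyRange 0 n 1).foldl (fun cnt j =>
    let s := (PySem.List.pyRange 0 n 1).foldl
      (fun (st : Int × Int) i =>
        if pvCell room i j = '.' then (st.1 + 1, st.2)
        else (0, if st.1 > 1 then st.2 + 1 else st.2))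
      ((0 : Int), cnt)
    if s.1 > 1 then s.2 + 1 else s.2) 0

-- ===== PORT B =====
def count_vertical_space_alt (room : List String) (n : Int) : Int :=
  (((PySem.List.pyRange 0 n 1).map (fun j =>
    (((PySem.List.pyRange 0 (n - 1) 1).map (fun i =>
      if pvCell room i j = '.' ∧ pvCell room (i + 1) j = '.' ∧
          (i = 0 ∨ pvCell room (i - 1) j ≠ '.')
      then (1 : Int) else 0))).sum))).sum

-- ===== PRECONDITION & SPEC =====
-- Pre_ = exactly the inputs where Python A returns (no IndexError):
-- the first n rows exist and each has at least n characters.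
def Pre_count_vertical_space (room : List String) (n : Int) : Prop :=
  n.toNat ≤ room.length ∧ ∀ s ∈ room.take n.toNat, n.toNat ≤ s.toList.length
instance (room : List String) (n : Int) : Decidable (Pre_count_vertical_space room n) := by
  unfold Pre_count_vertical_space; infer_instance
def pvWitness_count_vertical_space : List String × Int := (["..", ".X"], 2)

def Spec_count_vertical_space (room : List String) (n : Int) (out : Int) : Prop := out = count_vertical_space_alt room n
instance (room : List String) (n : Int) (out : Int) : Decidable (Spec_count_vertical_space room n out) := by unfold Spec_count_vertical_space; infer_instance

-- ===== CLAIM (what is proved, stated in full; the proofs are below) =====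
def Claim_equal_count_vertical_space : Prop := ∀ (room : List String) (n : Int), Dom_count_vertical_space room n → Pre_count_vertical_space room n → Spec_count_vertical_space room n (count_vertical_space room n)

-- ===== LEMMAS AND PROOFS =====

-- abstract one column as a function g : Int → Char (g i = cell in row i)

-- A's running dot-counter after the first m rows
def pvTmp (g : Int → Char) : Nat → Int
  | 0 => 0
  | m + 1 => if g m = '.' then pvTmp g m + 1 else 0

-- A's gap counter after the first m rows (before the final flush)
def pvCnt (g : Int → Char) : Nat → Int
  | 0 => 0
  | m + 1 => if g m = '.' then pvCnt g m
             else if pvTmp g m > 1 then pvCnt g m + 1 else pvCnt g m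

-- B's per-row indicator: row i starts a dot-run of length ≥ 2
def pvInd (g : Int → Char) (i : Int) : Int :=
  if g i = '.' ∧ g (i + 1) = '.' ∧ (i = 0 ∨ g (i - 1) ≠ '.') then 1 else 0

lemma pvTmp_nonneg (g : Int → Char) (m : Nat) : 0 ≤ pvTmp g m := by
  induction m with
  | zero => simp [pvTmp]
  | succ m ih => simp only [pvTmp]; split <;> omega

lemma pvTmp_eq_zero_iff (g : Int → Char) (m : Nat) :
    pvTmp g m = 0 ↔ (m = 0 ∨ g ((m : Int) - 1) ≠ '.') := by
  cases m with
  | zero => simp [pvTmp]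
  | succ m =>
    have h := pvTmp_nonneg g m
    simp only [pvTmp]
    constructor
    · intro h0; split at h0
      · omega
      · right; push_cast; simpa using ‹¬ g (m : Int) = '.'›
    · intro h0
      rcases h0 with h0 | h0
      · omega
      · push_cast at h0; simp at h0; simp [h0]

-- the inner foldl of A is (pvTmp, cnt + pvCnt)
lemma innerA_eq (g : Int → Char) (m : Nat) (c : Int) :
    (PySem.List.pyRange 0 (m : Int) 1).foldl
      (fun (st : Int × Int) i =>
        if g i = '.' then (st.1 + 1, st.2)
        else (0, if st.1 > 1 then st.2 + 1 else st.2))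
      ((0 : Int), c) = (pvTmp g m, c + pvCnt g m) := by
  induction m with
  | zero => simp [pvTmp, pvCnt]
  | succ m ih =>
    have hsplit : PySem.List.pyRange 0 ((m : Int) + 1) 1
        = PySem.List.pyRange 0 (m : Int) 1 ++ [(m : Int)] :=
      PySem.List.pyRange_one_succ_right (by positivity)
    push_cast
    rw [hsplit, List.foldl_append, ih]
    simp only [List.foldl_cons, List.foldl_nil, pvTmp, pvCnt]
    split_ifs <;> simp [add_assoc]

-- key invariant: machine value after flush = number of run starts so far
lemma flush_eq_starts (g : Int → Char) (m : Nat) :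
    pvCnt g m + (if pvTmp g m > 1 then 1 else 0)
      = (((PySem.List.pyRange 0 ((m : Int) - 1) 1).map (pvInd g))).sum := by
  induction m with
  | zero => simp [PySem.List.pyRange_one_eq_nil, pvTmp, pvCnt]
  | succ m ih =>
    cases m with
    | zero =>
      rw [PySem.List.pyRange_one_eq_nil (by omega : ((1 : Nat) : Int) - 1 ≤ 0)]
      simp only [pvTmp, pvCnt, List.map_nil, List.sum_nil]
      split_ifs <;> omega
    | succ k =>
      have hsplit : PySem.List.pyRange 0 (((k + 1 + 1 : Nat) : Int) - 1) 1
          = PySem.List.pyRange 0 (((k + 1 : Nat) : Int) - 1) 1 ++ [((k : Nat) : Int)] := by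
        push_cast
        have h1 : ((k : Int) + 1 + 1) - 1 = ((k : Int) + 1 - 1) + 1 := by ring
        rw [h1, PySem.List.pyRange_one_succ_right (by omega)]
        norm_num
      rw [hsplit, List.map_append, List.sum_append, ← ih]
      simp only [List.map_cons, List.map_nil, List.sum_cons, List.sum_nil]
      have hnn := pvTmp_nonneg g k
      have hz := pvTmp_eq_zero_iff g k
      have hT1 : pvTmp g (k + 1) = if g (k : Int) = '.' then pvTmp g k + 1 else 0 := rfl
      have hT2 : pvTmp g (k + 1 + 1) = if g ((k : Int) + 1) = '.' then pvTmp g (k + 1) + 1 else 0 := by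
        show (if g ((k + 1 : Nat) : Int) = '.' then _ else _) = _
        push_cast; rfl
      have hC2 : pvCnt g (k + 1 + 1) = if g ((k : Int) + 1) = '.' then pvCnt g (k + 1)
          else if pvTmp g (k + 1) > 1 then pvCnt g (k + 1) + 1 else pvCnt g (k + 1) := by
        show (if g ((k + 1 : Nat) : Int) = '.' then _ else _) = _
        push_cast; rfl
      have hcond : ((k : Int) = 0 ∨ g ((k : Int) - 1) ≠ '.') ↔ pvTmp g k = 0 := by
        rw [hz]
        constructor
        · rintro (h | h)
          · left; exact_mod_cast h
          · right; exact h
        · rintro (h | h)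
          · left; exact_mod_cast h
          · right; exact h
      rw [hT2, hC2]
      simp only [pvInd, propext hcond]
      by_cases b1 : g (k : Int) = '.' <;> by_cases b2 : g ((k : Int) + 1) = '.' <;>
        simp only [hT1, b1, b2, if_true, not_false_iff, true_and, false_and, and_false, if_neg] <;>
        split_ifs <;> omega

lemma col_eq (g : Int → Char) (m : Nat) (c : Int) :
    (let s := (PySem.List.pyRange 0 (m : Int) 1).foldl
        (fun (st : Int × Int) i =>
          if g i = '.' then (st.1 + 1, st.2)
          else (0, if st.1 > 1 then st.2 + 1 else st.2))
        ((0 : Int), c)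
      if s.1 > 1 then s.2 + 1 else s.2)
    = c + (((PySem.List.pyRange 0 ((m : Int) - 1) 1).map (pvInd g))).sum := by
  rw [innerA_eq, ← flush_eq_starts]
  dsimp only
  split <;> omega

lemma foldl_add_sum (l : List Int) (h : Int → Int) (c : Int) :
    l.foldl (fun acc j => acc + h j) c = c + (l.map h).sum := by
  induction l generalizing c with
  | nil => simp
  | cons x xs ih => simp [List.foldl_cons, ih, add_assoc]

-- ===== VERDICT (by name: the statement is the Claim_ definition above) =====
theorem count_vertical_space_spec : Claim_equal_count_vertical_space := by
  intro room n _ _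
  unfold Spec_count_vertical_space count_vertical_space count_vertical_space_alt
  rcases le_or_gt n 0 with hn | hn
  · rw [PySem.List.pyRange_one_eq_nil hn]; simp
  · have hmn : ((n.toNat : Int)) = n := Int.toNat_of_nonneg (le_of_lt hn)
    have hbody : ∀ (c j : Int),
        (let s := (PySem.List.pyRange 0 n 1).foldl
            (fun (st : Int × Int) i =>
              if pvCell room i j = '.' then (st.1 + 1, st.2)
              else (0, if st.1 > 1 then st.2 + 1 else st.2))
            ((0 : Int), c)
          if s.1 > 1 then s.2 + 1 else s.2)
        = c + (((PySem.List.pyRange 0 (n - 1) 1).map (pvInd (fun i => pvCell room i j)))).sum := by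
      intro c j
      have := col_eq (fun i => pvCell room i j) n.toNat c
      rw [hmn] at this
      exact this
    calc (PySem.List.pyRange 0 n 1).foldl (fun cnt j =>
          let s := (PySem.List.pyRange 0 n 1).foldl
            (fun (st : Int × Int) i =>
              if pvCell room i j = '.' then (st.1 + 1, st.2)
              else (0, if st.1 > 1 then st.2 + 1 else st.2))
            ((0 : Int), cnt)
          if s.1 > 1 then s.2 + 1 else s.2) 0
        = (PySem.List.pyRange 0 n 1).foldl (fun cnt j =>
            cnt + (((PySem.List.pyRange 0 (n - 1) 1).map (pvInd (fun i => pvCell room i j)))).sum) 0 := by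
          apply List.foldl_ext
          intro a x _
          exact hbody a x
      _ = _ := by
          rw [foldl_add_sum, zero_add]
          rfl
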